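-- pv_equiv track=rewrite | github.com/Leryk1981/mdf-cutting | test/test_packing.py | hybrid_sort_big_first
-- ===== SOURCE A (Python) =====
-- def hybrid_sort_big_first(rectangles):
--     """Сортировка деталей для оптимальной упаковки.
--     Сначала большие детали, потом средние, потом маленькие."""
--     medium, large, small = [], [], []
--     for w, h, idx in rectangles:
--         if w > 2000:
--             large.append((w, h, idx))
--         elif w < 800:
--             small.append((w, h, idx))
--         else:
--             medium.append((w, h, idx))
--     return (sorted(large, key=lambda x: -x[0]) +
--             sorted(medium, key=lambda x: -(x[0] * x[1])) +
--             sorted(small, key=lambda x: (-x[0], -x[1])))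
-- ===== SOURCE B (Python) =====
-- def hybrid_sort_big_first(rectangles):
--     def key(rect):
--         w, h, idx = rect
--         if w > 2000:
--             return (0, -w, 0)
--         if w < 800:
--             return (2, -w, -h)
--         return (1, -(w * h), 0)
--     return sorted(rectangles, key=key)
-- ===== Notes on version B (the rewrite author's own statement) =====
-- stated objective: simpler
-- what changed: A builds three explicit bucket lists in a loop and sorts each with its own key before concatenating; B does a single stable sort of the whole list under one composite key (bucket rank, primary, secondary) that encodes the bucket order and each bucket's sort order.
import Mathlib
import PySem

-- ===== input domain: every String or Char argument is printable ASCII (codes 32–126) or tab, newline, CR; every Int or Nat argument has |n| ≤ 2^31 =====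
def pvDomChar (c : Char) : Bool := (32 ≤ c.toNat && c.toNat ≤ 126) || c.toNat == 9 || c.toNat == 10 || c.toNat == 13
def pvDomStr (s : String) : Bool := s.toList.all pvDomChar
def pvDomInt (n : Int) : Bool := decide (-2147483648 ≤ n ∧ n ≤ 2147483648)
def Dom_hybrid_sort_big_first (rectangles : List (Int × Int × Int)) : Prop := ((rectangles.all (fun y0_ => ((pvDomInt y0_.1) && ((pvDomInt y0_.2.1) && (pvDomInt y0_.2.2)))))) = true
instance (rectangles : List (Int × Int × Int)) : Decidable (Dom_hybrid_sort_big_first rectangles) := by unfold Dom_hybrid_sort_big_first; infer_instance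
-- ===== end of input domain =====

-- B replaces A's three explicit buckets and three separate sorts by ONE stable sort under a
-- composite lexicographic key (bucket rank, primary, secondary) — simpler decomposition, same values.

-- ===== PORT A =====
def hybrid_sort_big_first (rectangles : List (Int × Int × Int)) : List (Int × Int × Int) :=
  -- medium, large, small = [], [], []; for w, h, idx in rectangles: append to one bucket
  let t := rectangles.foldl
    (fun (t : List (Int × Int × Int) × List (Int × Int × Int) × List (Int × Int × Int)) r =>
      if r.1 > 2000 then (t.1, t.2.1 ++ [r], t.2.2)
      else if r.1 < 800 then (t.1, t.2.1, t.2.2 ++ [r])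
      else (t.1 ++ [r], t.2.1, t.2.2))
    ([], [], [])
  -- sorted(large, key=-x[0]) + sorted(medium, key=-(x[0]*x[1])) + sorted(small, key=(-x[0], -x[1]))
  PySem.List.sorted t.2.1 (fun x => -x.1) false ++
    (PySem.List.sorted t.1 (fun x => -(x.1 * x.2.1)) false ++
      PySem.List.sorted2 t.2.2 (fun x => -x.1) (fun x => -x.2.1) false)

-- ===== PORT B =====
-- B's key(rect): (0,-w,0) for w>2000, (2,-w,-h) for w<800, else (1,-(w*h),0); tuple = lex order
def pvKey (r : Int × Int × Int) : Lex (Int × Lex (Int × Int)) :=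
  if r.1 > 2000 then toLex (0, toLex (-r.1, 0))
  else if r.1 < 800 then toLex (2, toLex (-r.1, -r.2.1))
  else toLex (1, toLex (-(r.1 * r.2.1), 0))

def hybrid_sort_big_first_alt (rectangles : List (Int × Int × Int)) : List (Int × Int × Int) :=
  PySem.List.sorted rectangles pvKey false

-- ===== PRECONDITION & SPEC =====
def Spec_hybrid_sort_big_first (rectangles : List (Int × Int × Int)) (out : List (Int × Int × Int)) : Prop := out = hybrid_sort_big_first_alt rectangles
instance (rectangles : List (Int × Int × Int)) (out : List (Int × Int × Int)) : Decidable (Spec_hybrid_sort_big_first rectangles out) := by unfold Spec_hybrid_sort_big_first; infer_instance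

-- ===== CLAIM (what is proved, stated in full; the proofs are below) =====
def Claim_equal_hybrid_sort_big_first : Prop := ∀ (rectangles : List (Int × Int × Int)), Dom_hybrid_sort_big_first rectangles → Spec_hybrid_sort_big_first rectangles (hybrid_sort_big_first rectangles)

-- ===== LEMMAS AND PROOFS =====

-- bucket predicates
def pvL (r : Int × Int × Int) : Bool := decide (r.1 > 2000)
def pvM (r : Int × Int × Int) : Bool := decide (¬ r.1 > 2000 ∧ ¬ r.1 < 800)
def pvS (r : Int × Int × Int) : Bool := decide (¬ r.1 > 2000 ∧ r.1 < 800)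

-- A's bucketing loop computes the three filters
lemma pv_foldA : ∀ (xs : List (Int × Int × Int)) (m l s : List (Int × Int × Int)),
    xs.foldl
      (fun (t : List (Int × Int × Int) × List (Int × Int × Int) × List (Int × Int × Int)) r =>
        if r.1 > 2000 then (t.1, t.2.1 ++ [r], t.2.2)
        else if r.1 < 800 then (t.1, t.2.1, t.2.2 ++ [r])
        else (t.1 ++ [r], t.2.1, t.2.2)) (m, l, s)
    = (m ++ xs.filter pvM, l ++ xs.filter pvL, s ++ xs.filter pvS) := by
  intro xs
  induction xs with
  | nil => intro m l s; simp
  | cons x xs ih =>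
    intro m l s
    by_cases h1 : x.1 > 2000
    · simp [List.foldl_cons, h1, ih, pvL, pvM, pvS]
    · by_cases h2 : x.1 < 800
      · simp [List.foldl_cons, h1, h2, ih, pvL, pvM, pvS]
      · simp [List.foldl_cons, h1, h2, ih, pvL, pvM, pvS]

lemma pv_insertBy_congr {α : Type} (b1 b2 : α → α → Bool) (x : α) :
    ∀ (ys : List α), (∀ y ∈ ys, b1 x y = b2 x y) →
    PySem.List.insertBy b1 x ys = PySem.List.insertBy b2 x ys := by
  intro ys
  induction ys with
  | nil => intro _; rfl
  | cons y ys ih =>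
    intro h
    have hy : b1 x y = b2 x y := h y (by simp)
    by_cases hb : b2 x y = true
    · simp [PySem.List.insertBy, hy, hb]
    · simp only [Bool.not_eq_true] at hb
      simp [PySem.List.insertBy, hy, hb, ih (fun z hz => h z (by simp [hz]))]

lemma pv_foldl_insertBy_congr {α : Type} (b1 b2 : α → α → Bool) :
    ∀ (xs init : List α),
    (∀ a b, a ∈ xs → (b ∈ xs ∨ b ∈ init) → b1 a b = b2 a b) →
    xs.foldl (fun acc x => PySem.List.insertBy b1 x acc) init
      = xs.foldl (fun acc x => PySem.List.insertBy b2 x acc) init := by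
  intro xs
  induction xs with
  | nil => intro _ _; rfl
  | cons x xs ih =>
    intro init h
    have hx : PySem.List.insertBy b1 x init = PySem.List.insertBy b2 x init :=
      pv_insertBy_congr b1 b2 x init (fun y hy => h x y (by simp) (Or.inr hy))
    simp only [List.foldl_cons, hx]
    exact ih _ (fun a b ha hb => by
      rcases hb with hb | hb
      · exact h a b (by simp [ha]) (Or.inl (by simp [hb]))
      · rcases (PySem.List.mem_insertBy b2 x b init).mp hb with rfl | hb
        · exact h a b (by simp [ha]) (Or.inl (by simp))
        · exact h a b (by simp [ha]) (Or.inr hb))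

lemma pv_insertBy_append_right {α : Type} (before : α → α → Bool) (x : α) :
    ∀ (l1 l2 : List α), (∀ y ∈ l2, before x y = true) →
    PySem.List.insertBy before x (l1 ++ l2) = PySem.List.insertBy before x l1 ++ l2 := by
  intro l1
  induction l1 with
  | nil =>
    intro l2 h
    cases l2 with
    | nil => rfl
    | cons y ys => simp [PySem.List.insertBy, h y (by simp)]
  | cons a l1 ih =>
    intro l2 h
    by_cases hb : before x a = true
    · simp [PySem.List.insertBy, hb]
    · simp only [Bool.not_eq_true] at hb
      simp [PySem.List.insertBy, hb, ih l2 h]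

lemma pv_insertBy_append_left {α : Type} (before : α → α → Bool) (x : α) :
    ∀ (l1 l2 : List α), (∀ y ∈ l1, before x y = false) →
    PySem.List.insertBy before x (l1 ++ l2) = l1 ++ PySem.List.insertBy before x l2 := by
  intro l1
  induction l1 with
  | nil => intro l2 _; rfl
  | cons a l1 ih =>
    intro l2 h
    simp [PySem.List.insertBy, h a (by simp), ih l2 (fun y hy => h y (by simp [hy]))]

-- stable insertion sort splits along a bucket boundary
lemma pv_foldl_insertBy_split {α : Type} (before : α → α → Bool) (p : α → Bool) :
    ∀ (xs i1 i2 : List α),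
    (∀ a b, (a ∈ xs ∨ a ∈ i1 ∨ a ∈ i2) → (b ∈ xs ∨ b ∈ i1 ∨ b ∈ i2) →
       p a = true → p b = false → before a b = true ∧ before b a = false) →
    (∀ y ∈ i1, p y = true) → (∀ y ∈ i2, p y = false) →
    xs.foldl (fun acc x => PySem.List.insertBy before x acc) (i1 ++ i2)
      = (xs.filter p).foldl (fun acc x => PySem.List.insertBy before x acc) i1
        ++ (xs.filter (fun x => !p x)).foldl (fun acc x => PySem.List.insertBy before x acc) i2 := by
  intro xs
  induction xs with
  | nil => intro i1 i2 _ _ _; rfl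
  | cons x xs ih =>
    intro i1 i2 hb h1 h2
    by_cases hp : p x = true
    · have step : PySem.List.insertBy before x (i1 ++ i2)
          = PySem.List.insertBy before x i1 ++ i2 :=
        pv_insertBy_append_right before x i1 i2
          (fun y hy => (hb x y (by simp) (by simp [hy]) hp (h2 y hy)).1)
      rw [List.foldl_cons, step]
      have e1 : (x :: xs).filter p = x :: xs.filter p := by simp [hp]
      have e2 : (x :: xs).filter (fun x => !p x) = xs.filter (fun x => !p x) := by
        simp [hp]
      rw [e1, e2, List.foldl_cons]
      exact ih (PySem.List.insertBy before x i1) i2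
        (fun a b ha hbm => by
          apply hb a b
          · rcases ha with ha | ha | ha
            · exact Or.inl (by simp [ha])
            · rcases (PySem.List.mem_insertBy before x a i1).mp ha with rfl | ha
              · exact Or.inl (by simp)
              · exact Or.inr (Or.inl ha)
            · exact Or.inr (Or.inr ha)
          · rcases hbm with hbm | hbm | hbm
            · exact Or.inl (by simp [hbm])
            · rcases (PySem.List.mem_insertBy before x b i1).mp hbm with rfl | hbm
              · exact Or.inl (by simp)
              · exact Or.inr (Or.inl hbm)
            · exact Or.inr (Or.inr hbm))
        (fun y hy => by
          rcases (PySem.List.mem_insertBy before x y i1).mp hy with rfl | hy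
          · exact hp
          · exact h1 y hy)
        h2
    · simp only [Bool.not_eq_true] at hp
      have step : PySem.List.insertBy before x (i1 ++ i2)
          = i1 ++ PySem.List.insertBy before x i2 :=
        pv_insertBy_append_left before x i1 i2
          (fun y hy => (hb y x (by simp [hy]) (by simp) (h1 y hy) hp).2)
      rw [List.foldl_cons, step]
      have e1 : (x :: xs).filter p = xs.filter p := by simp [hp]
      have e2 : (x :: xs).filter (fun x => !p x) = x :: xs.filter (fun x => !p x) := by
        simp [hp]
      rw [e1, e2, List.foldl_cons]
      exact ih i1 (PySem.List.insertBy before x i2)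
        (fun a b ha hbm => by
          apply hb a b
          · rcases ha with ha | ha | ha
            · exact Or.inl (by simp [ha])
            · exact Or.inr (Or.inl ha)
            · rcases (PySem.List.mem_insertBy before x a i2).mp ha with rfl | ha
              · exact Or.inl (by simp)
              · exact Or.inr (Or.inr ha)
          · rcases hbm with hbm | hbm | hbm
            · exact Or.inl (by simp [hbm])
            · exact Or.inr (Or.inl hbm)
            · rcases (PySem.List.mem_insertBy before x b i2).mp hbm with rfl | hbm
              · exact Or.inl (by simp)
              · exact Or.inr (Or.inr hbm))
        h1
        (fun y hy => by
          rcases (PySem.List.mem_insertBy before x y i2).mp hy with rfl | hy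
          · exact hp
          · exact h2 y hy)

-- pvKey comparisons: bucket rank dominates
lemma pv_key_rank (a b : Int × Int × Int) (ha : pvL a = true) (hb : pvL b = false) :
    decide (pvKey a < pvKey b) = true ∧ decide (pvKey b < pvKey a) = false := by
  simp only [pvL, decide_eq_true_eq, decide_eq_false_iff_not] at ha hb
  unfold pvKey
  by_cases h2 : b.1 < 800 <;>
    simp [ha, hb, h2, Prod.Lex.lt_iff]

lemma pv_key_rank_ms (a b : Int × Int × Int) (ha : pvM a = true) (hb : pvS b = true) :
    decide (pvKey a < pvKey b) = true ∧ decide (pvKey b < pvKey a) = false := by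
  simp only [pvM, pvS, decide_eq_true_eq] at ha hb
  unfold pvKey
  simp [ha.1, ha.2, hb.1, hb.2, Prod.Lex.lt_iff]

theorem hybrid_sort_big_first_spec' (rectangles : List (Int × Int × Int)) :
    hybrid_sort_big_first rectangles = hybrid_sort_big_first_alt rectangles := by
  -- B side: one stable sort splits into the three bucket sorts
  have hsplit1 := pv_foldl_insertBy_split (fun a b => decide (pvKey a < pvKey b)) pvL
      rectangles [] []
      (fun a b _ _ hpa hpb => pv_key_rank a b hpa hpb)
      (by simp) (by simp)
  have hsplit2 := pv_foldl_insertBy_split (fun a b => decide (pvKey a < pvKey b)) pvM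
      (rectangles.filter (fun x => !pvL x)) [] []
      (fun a b ha hbm hpa hpb => by
        have ha' : pvM a = true := hpa
        have hbS : pvS b = true := by
          rcases hbm with hbm | hbm | hbm
          · have := List.of_mem_filter hbm
            simp only [Bool.not_eq_true'] at this
            simp only [pvL, decide_eq_false_iff_not] at this
            simp only [pvM, decide_eq_false_iff_not] at hpb
            simp only [pvS, decide_eq_true_eq]
            omega
          · simp at hbm
          · simp at hbm
        exact pv_key_rank_ms a b ha' hbS)
      (by simp) (by simp)
  -- combine filters
  have hfM : (rectangles.filter (fun x => !pvL x)).filter pvM = rectangles.filter pvM := by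
    rw [List.filter_filter]
    apply List.filter_congr
    intro a _
    by_cases h1 : a.1 > 2000 <;> by_cases h2 : a.1 < 800 <;> simp [pvL, pvM, h1, h2]
  have hfS : (rectangles.filter (fun x => !pvL x)).filter (fun x => !pvM x)
      = rectangles.filter pvS := by
    rw [List.filter_filter]
    apply List.filter_congr
    intro a _
    by_cases h1 : a.1 > 2000 <;> by_cases h2 : a.1 < 800 <;> simp [pvL, pvM, pvS, h1, h2]
  -- per-bucket key congruence
  have hL : (rectangles.filter pvL).foldl
        (fun acc x => PySem.List.insertBy (fun a b => decide (pvKey a < pvKey b)) x acc) []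
      = PySem.List.sorted (rectangles.filter pvL) (fun x => -x.1) false := by
    rw [PySem.List.sorted_eq_foldl_insertBy]
    apply pv_foldl_insertBy_congr
    intro a b ha hbm
    have hbm' : b ∈ rectangles.filter pvL := by rcases hbm with h | h; exact h; simp at h
    have hpa := List.of_mem_filter ha
    have hpb := List.of_mem_filter hbm'
    simp only [pvL, decide_eq_true_eq] at hpa hpb
    simp only [pvKey, hpa, hpb, if_pos, decide_eq_decide, Prod.Lex.lt_iff]
    simp
  have hM : (rectangles.filter pvM).foldl
        (fun acc x => PySem.List.insertBy (fun a b => decide (pvKey a < pvKey b)) x acc) []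
      = PySem.List.sorted (rectangles.filter pvM) (fun x => -(x.1 * x.2.1)) false := by
    rw [PySem.List.sorted_eq_foldl_insertBy]
    apply pv_foldl_insertBy_congr
    intro a b ha hbm
    have hbm' : b ∈ rectangles.filter pvM := by rcases hbm with h | h; exact h; simp at h
    have hpa := List.of_mem_filter ha
    have hpb := List.of_mem_filter hbm'
    simp only [pvM, decide_eq_true_eq] at hpa hpb
    simp only [pvKey, hpa.1, hpa.2, hpb.1, hpb.2, decide_eq_decide, Prod.Lex.lt_iff]
    simp
  have hS : (rectangles.filter pvS).foldl
        (fun acc x => PySem.List.insertBy (fun a b => decide (pvKey a < pvKey b)) x acc) []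
      = PySem.List.sorted2 (rectangles.filter pvS) (fun x => -x.1) (fun x => -x.2.1) false := by
    show _ = (rectangles.filter pvS).foldl (fun acc x => PySem.List.insertBy
      (fun a b => decide ((-a.1 : Int) < -b.1) ||
        (!decide ((-b.1 : Int) < -a.1) && decide ((-a.2.1 : Int) < -b.2.1))) x acc) []
    apply pv_foldl_insertBy_congr
    intro a b ha hbm
    have hbm' : b ∈ rectangles.filter pvS := by rcases hbm with h | h; exact h; simp at h
    have hpa := List.of_mem_filter ha
    have hpb := List.of_mem_filter hbm'
    simp only [pvS, decide_eq_true_eq] at hpa hpb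
    simp only [pvKey, hpa.1, hpa.2, hpb.1, hpb.2]
    by_cases h1 : (-a.1 : Int) < -b.1 <;> by_cases h2 : (-b.1 : Int) < -a.1 <;>
      simp [h1, h2, Prod.Lex.lt_iff] <;> omega
  -- assemble
  simp only [List.nil_append] at hsplit1 hsplit2
  unfold hybrid_sort_big_first hybrid_sort_big_first_alt
  rw [pv_foldA]
  simp only [List.nil_append]
  conv_rhs => rw [PySem.List.sorted_eq_foldl_insertBy]
  rw [hsplit1, hsplit2, hfM, hfS, hL, hM, hS]

-- ===== VERDICT (by name: the statement is the Claim_ definition above) =====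
theorem hybrid_sort_big_first_spec : Claim_equal_hybrid_sort_big_first := by
  intro rectangles _
  unfold Spec_hybrid_sort_big_first
  exact hybrid_sort_big_first_spec' rectangles
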